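-- pv_equiv track=rewrite | github.com/QuNB-Repo/DLCheM | dlchem_latentspace_extraction/SchNet_latentspace/label/manuallabel/utils/utils.py | count_nn
-- ===== SOURCE A (Python) =====
-- def count_nn(nn,xyz_file_read):
--     countC = 0
--     countH = 0
--     countO = 0
--     countN = 0
--     countF = 0
--     for j in range(len(nn)):
--         for line_index, each_line in enumerate(xyz_file_read.split('\n')):
--             if line_index == int(nn[j])+1:
--                 if '1' in each_line[0:1]:
--                     countH = countH+1
--                 if '6' in each_line[0:1]:
--                     countC = countC+1
--                 if '7' in each_line[0:1]:
--                     countN = countN+1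
--                 if '8' in each_line[0:1]:
--                     countO = countO+1
--                 if '9' in each_line[0:1]:
--                     countF = countF + 1
--     total = countC + countH + countO + countN + countF
--
--     return total, countC, countH, countO, countN, countF
-- ===== SOURCE B (Python) =====
-- def count_nn(nn, xyz_file_read):
--     lines = xyz_file_read.split('\n')
--     countC = 0
--     countH = 0
--     countO = 0
--     countN = 0
--     countF = 0
--     for x in nn:
--         i = int(x) + 1
--         if 0 <= i < len(lines):
--             ch = lines[i][0:1]
--             if ch == '1':
--                 countH += 1
--             elif ch == '6':
--                 countC += 1
--             elif ch == '7':
--                 countN += 1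
--             elif ch == '8':
--                 countO += 1
--             elif ch == '9':
--                 countF += 1
--     total = countC + countH + countO + countN + countF
--     return total, countC, countH, countO, countN, countF
-- ===== Notes on version B (the rewrite author's own statement) =====
-- stated objective: faster
-- what changed: B splits the text once and directly indexes lines[int(x)+1] (with a bounds check) for each neighbor, replacing A's full enumerate-scan of all lines per neighbor and its five substring tests with a single first-character elif chain.
import Mathlib
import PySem

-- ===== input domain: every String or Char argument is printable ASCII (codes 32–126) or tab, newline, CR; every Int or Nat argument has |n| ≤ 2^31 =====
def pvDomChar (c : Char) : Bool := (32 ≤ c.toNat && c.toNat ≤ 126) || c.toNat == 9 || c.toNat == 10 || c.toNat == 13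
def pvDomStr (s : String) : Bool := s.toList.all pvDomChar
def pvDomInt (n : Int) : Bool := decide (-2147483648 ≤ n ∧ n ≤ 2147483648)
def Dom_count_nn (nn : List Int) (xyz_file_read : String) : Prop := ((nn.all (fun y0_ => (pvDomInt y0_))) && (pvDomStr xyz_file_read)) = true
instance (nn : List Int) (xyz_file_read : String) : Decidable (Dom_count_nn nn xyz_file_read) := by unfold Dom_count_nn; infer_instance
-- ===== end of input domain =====

-- B replaces A's rescan of all split lines once per neighbor by a single direct index into the line list per neighbor (return value only; neither version mutates).

-- ===== PORT A =====
-- A's loop body on a matched line: the five independent '<digit>' in line[0:1] tests, in A's order (H,C,N,O,F) on state (cC,cH,cO,cN,cF)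
def pvStepA (st : Int × Int × Int × Int × Int) (line : String) : Int × Int × Int × Int × Int :=
  let cH := if PySem.Str.isIn "1" (PySem.Str.slice line (some 0) (some 1)) then st.2.1 + 1 else st.2.1
  let cC := if PySem.Str.isIn "6" (PySem.Str.slice line (some 0) (some 1)) then st.1 + 1 else st.1
  let cN := if PySem.Str.isIn "7" (PySem.Str.slice line (some 0) (some 1)) then st.2.2.2.1 + 1 else st.2.2.2.1
  let cO := if PySem.Str.isIn "8" (PySem.Str.slice line (some 0) (some 1)) then st.2.2.1 + 1 else st.2.2.1
  let cF := if PySem.Str.isIn "9" (PySem.Str.slice line (some 0) (some 1)) then st.2.2.2.2 + 1 else st.2.2.2.2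
  (cC, cH, cO, cN, cF)

def count_nn (nn : List Int) (xyz_file_read : String) : Int × Int × Int × Int × Int × Int :=
  let s : Int × Int × Int × Int × Int :=
    (PySem.List.pyRange 0 (nn.length : Int) 1).foldl
      (fun st j =>
        (PySem.List.enumerate ((PySem.Str.split? xyz_file_read "\n").getD []) 0).foldl
          (fun st2 p => if p.1 = PySem.List.pyGetD nn j 0 + 1 then pvStepA st2 p.2 else st2)
          st)
      (0, 0, 0, 0, 0)
  (s.1 + s.2.1 + s.2.2.1 + s.2.2.2.1 + s.2.2.2.2, s)

-- ===== PORT B =====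
-- B's tally on the (already sliced) first character: an elif chain
def pvStepB (st : Int × Int × Int × Int × Int) (ch : String) : Int × Int × Int × Int × Int :=
  if ch = "1" then (st.1, st.2.1 + 1, st.2.2)
  else if ch = "6" then (st.1 + 1, st.2)
  else if ch = "7" then (st.1, st.2.1, st.2.2.1, st.2.2.2.1 + 1, st.2.2.2.2)
  else if ch = "8" then (st.1, st.2.1, st.2.2.1 + 1, st.2.2.2)
  else if ch = "9" then (st.1, st.2.1, st.2.2.1, st.2.2.2.1, st.2.2.2.2 + 1)
  else st

def count_nn_alt (nn : List Int) (xyz_file_read : String) : Int × Int × Int × Int × Int × Int :=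
  let lines := (PySem.Str.split? xyz_file_read "\n").getD []
  let s : Int × Int × Int × Int × Int :=
    nn.foldl
      (fun st x =>
        if 0 ≤ x + 1 ∧ x + 1 < (lines.length : Int) then
          pvStepB st (PySem.Str.slice (PySem.List.pyGetD lines (x + 1) "") (some 0) (some 1))
        else st)
      (0, 0, 0, 0, 0)
  (s.1 + s.2.1 + s.2.2.1 + s.2.2.2.1 + s.2.2.2.2, s)

-- ===== PRECONDITION & SPEC =====
def Spec_count_nn (nn : List Int) (xyz_file_read : String) (out : Int × Int × Int × Int × Int × Int) : Prop := out = count_nn_alt nn xyz_file_read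
instance (nn : List Int) (xyz_file_read : String) (out : Int × Int × Int × Int × Int × Int) : Decidable (Spec_count_nn nn xyz_file_read out) := by unfold Spec_count_nn; infer_instance

-- ===== CLAIM (what is proved, stated in full; the proofs are below) =====
def Claim_equal_count_nn : Prop := ∀ (nn : List Int) (xyz_file_read : String), Dom_count_nn nn xyz_file_read → Spec_count_nn nn xyz_file_read (count_nn nn xyz_file_read)

-- ===== LEMMAS AND PROOFS =====

-- A's inner scan over enumerate(lines) with guard 'index = t' is a direct lookup at t
theorem pv_inner_scan (lines : List String) (t : Int) :
    ∀ (s : Int) (st : Int × Int × Int × Int × Int),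
      (PySem.List.enumerate lines s).foldl
        (fun st2 p => if p.1 = t then pvStepA st2 p.2 else st2) st
      = if s ≤ t ∧ t < s + lines.length then pvStepA st (lines.getD (t - s).toNat "") else st := by
  induction lines with
  | nil =>
    intro s st
    rw [PySem.List.enumerate_nil]
    simp only [List.foldl_nil, List.length_nil, Nat.cast_zero]
    rw [if_neg (by omega)]
  | cons l ls ih =>
    intro s st
    rw [PySem.List.enumerate_cons, List.foldl_cons, ih (s + 1)]
    simp only [List.length_cons, Nat.cast_add, Nat.cast_one]
    by_cases h : s = t
    · subst h
      have h2 : s ≤ s ∧ s < s + ((ls.length : Int) + 1) := by omega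
      simp [h2]
    · by_cases h2 : s + 1 ≤ t ∧ t < s + 1 + (ls.length : Int)
      · have h3 : s ≤ t ∧ t < s + ((ls.length : Int) + 1) := by omega
        have h4 : (t - s).toNat = (t - (s + 1)).toNat + 1 := by omega
        simp [h, h2, h3, h4]
      · have h3 : ¬ (s ≤ t ∧ t < s + ((ls.length : Int) + 1)) := by omega
        simp [h, h3]
        intro h4 h5
        omega

-- '<digit>' in line[0:1] and line[0:1] == '<digit>' both say: the first character is that digit; so the two step functions agree
theorem pv_step_eq (st : Int × Int × Int × Int × Int) (line : String) :
    pvStepA st line = pvStepB st (PySem.Str.slice line (some 0) (some 1)) := by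
  have hch : (PySem.Str.slice line (some 0) (some 1)).toList = line.toList.take 1 := by
    simp [pysem]
  unfold pvStepA pvStepB
  cases hl : line.toList.take 1 with
  | nil =>
    have hnil : (PySem.Str.slice line (some 0) (some 1)).toList = [] := hch.trans hl
    have hF : ∀ (sub : String) (d : Char), sub.toList = [d] →
        PySem.Str.isIn sub (PySem.Str.slice line (some 0) (some 1)) = false := by
      intro sub d hs
      rw [Bool.eq_false_iff, Ne, PySem.Str.isIn_iff_infix, hs, hnil, List.singleton_infix_iff]
      simp
    have hE : ∀ (sub : String) (d : Char), sub.toList = [d] →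
        ¬ (PySem.Str.slice line (some 0) (some 1) = sub) := by
      intro sub d hs hc
      rw [← String.toList_inj, hnil, hs] at hc
      simp at hc
    simp only [hF "1" '1' (by decide), hF "6" '6' (by decide), hF "7" '7' (by decide),
      hF "8" '8' (by decide), hF "9" '9' (by decide),
      hE "1" '1' (by decide), hE "6" '6' (by decide), hE "7" '7' (by decide),
      hE "8" '8' (by decide), hE "9" '9' (by decide)]
    simp
  | cons a rest =>
    have hrest : rest = [] := by
      have hlen := congrArg List.length hl
      simp at hlen
      cases rest with
      | nil => rfl
      | cons _ _ => simp at hlen; omega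
    subst hrest
    have hsing : (PySem.Str.slice line (some 0) (some 1)).toList = [a] := hch.trans hl
    have hT : ∀ (sub : String) (d : Char), sub.toList = [d] →
        ((PySem.Str.isIn sub (PySem.Str.slice line (some 0) (some 1)) = true) ↔ a = d) := by
      intro sub d hs
      rw [PySem.Str.isIn_iff_infix, hs, hsing, List.singleton_infix_iff]
      simp [eq_comm]
    have hE : ∀ (sub : String) (d : Char), sub.toList = [d] →
        ((PySem.Str.slice line (some 0) (some 1) = sub) ↔ a = d) := by
      intro sub d hs
      rw [← String.toList_inj, hsing, hs]
      simp
    simp only [hT "1" '1' (by decide), hT "6" '6' (by decide), hT "7" '7' (by decide),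
      hT "8" '8' (by decide), hT "9" '9' (by decide),
      hE "1" '1' (by decide), hE "6" '6' (by decide), hE "7" '7' (by decide),
      hE "8" '8' (by decide), hE "9" '9' (by decide)]
    split_ifs <;> simp_all

-- ===== VERDICT (by name: the statement is the Claim_ definition above) =====
theorem count_nn_spec : Claim_equal_count_nn := by
  intro nn xyz _
  unfold Spec_count_nn count_nn count_nn_alt
  set lines : List String := (PySem.Str.split? xyz "\n").getD [] with hlines
  have hfun :
      (fun (st : Int × Int × Int × Int × Int) (j : Int) =>
        (PySem.List.enumerate lines 0).foldl
          (fun st2 p => if p.1 = PySem.List.pyGetD nn j 0 + 1 then pvStepA st2 p.2 else st2) st)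
      = (fun (st : Int × Int × Int × Int × Int) (j : Int) =>
          (fun (acc : Int × Int × Int × Int × Int) (x : Int) =>
            if 0 ≤ x + 1 ∧ x + 1 < (lines.length : Int) then
              pvStepB acc (PySem.Str.slice (PySem.List.pyGetD lines (x + 1) "") (some 0) (some 1))
            else acc) st (PySem.List.pyGetD nn j 0)) := by
    funext st j
    rw [pv_inner_scan lines (PySem.List.pyGetD nn j 0 + 1) 0 st]
    by_cases h : 0 ≤ PySem.List.pyGetD nn j 0 + 1 ∧ PySem.List.pyGetD nn j 0 + 1 < (lines.length : Int)
    · have h' : (0 : Int) ≤ PySem.List.pyGetD nn j 0 + 1 ∧ PySem.List.pyGetD nn j 0 + 1 < 0 + (lines.length : Int) := by omega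
      beta_reduce
      rw [if_pos h', if_pos h, pv_step_eq]
      congr 2
      rw [PySem.List.pyGetD_eq_getElem lines "" h.1 h.2, List.getD_eq_getElem _ _ (by omega)]
      congr 1
      omega
    · have h' : ¬ ((0 : Int) ≤ PySem.List.pyGetD nn j 0 + 1 ∧ PySem.List.pyGetD nn j 0 + 1 < 0 + (lines.length : Int)) := by omega
      beta_reduce
      rw [if_neg h', if_neg h]
  rw [hfun, PySem.List.foldl_pyRange_zero_pyGetD' nn 0
    (fun (acc : Int × Int × Int × Int × Int) (x : Int) =>
      if 0 ≤ x + 1 ∧ x + 1 < (lines.length : Int) then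
        pvStepB acc (PySem.Str.slice (PySem.List.pyGetD lines (x + 1) "") (some 0) (some 1))
      else acc) (0, 0, 0, 0, 0)]
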